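-- pv_equiv track=rewrite | github.com/abhinavsarthak/Hands-on-Python | DAY8.py | classify_students
-- ===== SOURCE A (Python) =====
-- def classify_students(data):
--     categories = {
--         "At Risk": [],
--         "Average": [],
--         "Good": [],
--         "Top Performer": []
--     }
--
--     for student in data:
--         sid, marks, attendance, assignment, pi = student
--
--         if marks < 40 or attendance < 50:
--             categories["At Risk"].append(sid)
--         elif 40 <= marks <= 70:
--             categories["Average"].append(sid)
--         elif 71 <= marks <= 90:
--             categories["Good"].append(sid)
--         elif marks > 90 and attendance > 80:
--             categories["Top Performer"].append(sid)
--
--     return categories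
-- ===== SOURCE B (Python) =====
-- def classify_students(data):
--     # Four independent comprehensions, one per category, with closed predicates
--     # equivalent to A's first-match elif chain (marks/attendance are ints).
--     return {
--         "At Risk": [s[0] for s in data if s[1] < 40 or s[2] < 50],
--         "Average": [s[0] for s in data if 40 <= s[1] <= 70 and s[2] >= 50],
--         "Good": [s[0] for s in data if 71 <= s[1] <= 90 and s[2] >= 50],
--         "Top Performer": [s[0] for s in data if s[1] > 90 and s[2] > 80],
--     }
-- ===== Notes on version B (the rewrite author's own statement) =====
-- stated objective: idiomatic
-- what changed: Replaces the single loop with a mutated dict and first-match elif chain by a dict literal of four independent per-category comprehensions whose predicates are the closed forms of each branch.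
import Mathlib
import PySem

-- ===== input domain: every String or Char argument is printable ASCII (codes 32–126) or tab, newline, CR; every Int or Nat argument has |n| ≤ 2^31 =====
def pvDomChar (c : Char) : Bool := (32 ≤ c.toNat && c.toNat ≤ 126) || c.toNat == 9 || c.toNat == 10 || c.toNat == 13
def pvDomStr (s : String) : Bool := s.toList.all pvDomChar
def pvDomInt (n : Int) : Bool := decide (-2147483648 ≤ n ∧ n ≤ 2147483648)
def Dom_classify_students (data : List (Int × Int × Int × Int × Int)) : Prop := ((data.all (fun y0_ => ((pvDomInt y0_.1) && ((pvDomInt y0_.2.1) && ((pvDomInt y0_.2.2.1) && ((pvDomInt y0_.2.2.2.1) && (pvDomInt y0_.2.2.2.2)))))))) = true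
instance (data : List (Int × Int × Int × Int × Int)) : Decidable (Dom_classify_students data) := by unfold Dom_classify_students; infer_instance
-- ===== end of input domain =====

-- B replaces A's single loop mutating a dict via a first-match elif chain by four
-- independent per-category filtered comprehensions (idiomatic; same O(n) cost).

-- ===== PORT A =====
-- Literal port of A: dict pre-seeded with four categories, one loop appending
-- the sid to the category of the first matching branch (else nothing).
-- Loop body of A, as a named step function over the dict state.
def classifyStepA (categories : PySem.Dict String (List Int))
    (student : Int × Int × Int × Int × Int) : PySem.Dict String (List Int) :=
  let sid := student.1
  let marks := student.2.1
  let attendance := student.2.2.1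
  if marks < 40 ∨ attendance < 50 then
    categories.modify "At Risk" [] (· ++ [sid])
  else if 40 ≤ marks ∧ marks ≤ 70 then
    categories.modify "Average" [] (· ++ [sid])
  else if 71 ≤ marks ∧ marks ≤ 90 then
    categories.modify "Good" [] (· ++ [sid])
  else if marks > 90 ∧ attendance > 80 then
    categories.modify "Top Performer" [] (· ++ [sid])
  else categories

def classify_students (data : List (Int × Int × Int × Int × Int)) : List (String × List Int) :=
  (data.foldl classifyStepA
    (PySem.Dict.mk [("At Risk", []), ("Average", []), ("Good", []), ("Top Performer", [])])).items

-- ===== PORT B =====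
-- Port of B: four independent filtered comprehensions, one per category.
def classify_students_alt (data : List (Int × Int × Int × Int × Int)) : List (String × List Int) :=
  [ ("At Risk",       (data.filter (fun s => s.2.1 < 40 ∨ s.2.2.1 < 50)).map (·.1)),
    ("Average",       (data.filter (fun s => (40 ≤ s.2.1 ∧ s.2.1 ≤ 70) ∧ 50 ≤ s.2.2.1)).map (·.1)),
    ("Good",          (data.filter (fun s => (71 ≤ s.2.1 ∧ s.2.1 ≤ 90) ∧ 50 ≤ s.2.2.1)).map (·.1)),
    ("Top Performer", (data.filter (fun s => s.2.1 > 90 ∧ s.2.2.1 > 80)).map (·.1)) ]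

-- ===== PRECONDITION & SPEC =====
def Spec_classify_students (data : List (Int × Int × Int × Int × Int)) (out : List (String × List Int)) : Prop := out = classify_students_alt data
instance (data : List (Int × Int × Int × Int × Int)) (out : List (String × List Int)) : Decidable (Spec_classify_students data out) := by unfold Spec_classify_students; infer_instance

-- ===== CLAIM (what is proved, stated in full; the proofs are below) =====
def Claim_equal_classify_students : Prop := ∀ (data : List (Int × Int × Int × Int × Int)), Dom_classify_students data → Spec_classify_students data (classify_students data)

-- ===== LEMMAS AND PROOFS =====

-- Loop invariant: folding A's step over `data` starting from the four seeded
-- category lists appends exactly B's filtered sid lists to each of them.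
theorem classify_foldl_inv (data : List (Int × Int × Int × Int × Int))
    (l1 l2 l3 l4 : List Int) :
    (data.foldl classifyStepA
      (PySem.Dict.mk [("At Risk", l1), ("Average", l2), ("Good", l3), ("Top Performer", l4)])).items
    = [ ("At Risk",       l1 ++ (data.filter (fun s => s.2.1 < 40 ∨ s.2.2.1 < 50)).map (·.1)),
        ("Average",       l2 ++ (data.filter (fun s => (40 ≤ s.2.1 ∧ s.2.1 ≤ 70) ∧ 50 ≤ s.2.2.1)).map (·.1)),
        ("Good",          l3 ++ (data.filter (fun s => (71 ≤ s.2.1 ∧ s.2.1 ≤ 90) ∧ 50 ≤ s.2.2.1)).map (·.1)),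
        ("Top Performer", l4 ++ (data.filter (fun s => s.2.1 > 90 ∧ s.2.2.1 > 80)).map (·.1)) ] := by
  induction data generalizing l1 l2 l3 l4 with
  | nil => simp
  | cons s rest ih =>
    obtain ⟨sid, marks, attendance, asg, pi⟩ := s
    rw [List.foldl_cons]
    by_cases h1 : marks < 40 ∨ attendance < 50
    · have n2 : ¬((40 ≤ marks ∧ marks ≤ 70) ∧ 50 ≤ attendance) := by omega
      have n3 : ¬((71 ≤ marks ∧ marks ≤ 90) ∧ 50 ≤ attendance) := by omega
      have n4 : ¬(marks > 90 ∧ attendance > 80) := by omega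
      have hs : classifyStepA (PySem.Dict.mk [("At Risk", l1), ("Average", l2), ("Good", l3), ("Top Performer", l4)]) (sid, marks, attendance, asg, pi)
          = PySem.Dict.mk [("At Risk", l1 ++ [sid]), ("Average", l2), ("Good", l3), ("Top Performer", l4)] := by
        simp [classifyStepA, h1, PySem.Dict.modify, PySem.Dict.getD, PySem.Dict.get?,
              PySem.Dict.insert, PySem.Dict.contains]
      rw [hs, ih]
      rcases h1 with hm | ha
      · have f2 : ¬(40 ≤ marks) := by omega
        have f3 : ¬(71 ≤ marks) := by omega
        have f4 : ¬(90 < marks) := by omega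
        simp [hm, f2, f3, f4]
      · have g0 : ¬(50 ≤ attendance) := by omega
        have g4 : ¬(80 < attendance) := by omega
        by_cases hm : marks < 40
        · have f2 : ¬(40 ≤ marks) := by omega
          have f3 : ¬(71 ≤ marks) := by omega
          have f4 : ¬(90 < marks) := by omega
          simp [hm, ha, f2, f3, f4, g0, g4]
        · simp [hm, ha, g0, g4]
    · by_cases h2 : 40 ≤ marks ∧ marks ≤ 70
      · have p2 : (40 ≤ marks ∧ marks ≤ 70) ∧ 50 ≤ attendance := by omega
        have n3 : ¬((71 ≤ marks ∧ marks ≤ 90) ∧ 50 ≤ attendance) := by omega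
        have n4 : ¬(marks > 90 ∧ attendance > 80) := by omega
        have hs : classifyStepA (PySem.Dict.mk [("At Risk", l1), ("Average", l2), ("Good", l3), ("Top Performer", l4)]) (sid, marks, attendance, asg, pi)
            = PySem.Dict.mk [("At Risk", l1), ("Average", l2 ++ [sid]), ("Good", l3), ("Top Performer", l4)] := by
          simp [classifyStepA, h1, h2, PySem.Dict.modify, PySem.Dict.getD, PySem.Dict.get?,
                PySem.Dict.insert, PySem.Dict.contains]
        rw [hs, ih]
        have hm : ¬(marks < 40) := by omega
        have ha : ¬(attendance < 50) := by omega
        have ta : 50 ≤ attendance := by omega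
        have f3 : ¬(71 ≤ marks) := by omega
        have f4 : ¬(90 < marks) := by omega
        simp [hm, ha, ta, h2.1, h2.2, f3, f4]
      · by_cases h3 : 71 ≤ marks ∧ marks ≤ 90
        · have p3 : (71 ≤ marks ∧ marks ≤ 90) ∧ 50 ≤ attendance := by omega
          have n2 : ¬((40 ≤ marks ∧ marks ≤ 70) ∧ 50 ≤ attendance) := by omega
          have n4 : ¬(marks > 90 ∧ attendance > 80) := by omega
          have hs : classifyStepA (PySem.Dict.mk [("At Risk", l1), ("Average", l2), ("Good", l3), ("Top Performer", l4)]) (sid, marks, attendance, asg, pi)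
              = PySem.Dict.mk [("At Risk", l1), ("Average", l2), ("Good", l3 ++ [sid]), ("Top Performer", l4)] := by
            simp [classifyStepA, h1, h2, h3, PySem.Dict.modify, PySem.Dict.getD, PySem.Dict.get?,
                  PySem.Dict.insert, PySem.Dict.contains]
          rw [hs, ih]
          have hm : ¬(marks < 40) := by omega
          have ha : ¬(attendance < 50) := by omega
          have ta : 50 ≤ attendance := by omega
          have f2 : ¬(marks ≤ 70) := by omega
          have f4 : ¬(90 < marks) := by omega
          simp [hm, ha, ta, h3.1, h3.2, f2, f4]
        · by_cases h4 : marks > 90 ∧ attendance > 80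
          · have n2 : ¬((40 ≤ marks ∧ marks ≤ 70) ∧ 50 ≤ attendance) := by omega
            have n3 : ¬((71 ≤ marks ∧ marks ≤ 90) ∧ 50 ≤ attendance) := by omega
            have hs : classifyStepA (PySem.Dict.mk [("At Risk", l1), ("Average", l2), ("Good", l3), ("Top Performer", l4)]) (sid, marks, attendance, asg, pi)
                = PySem.Dict.mk [("At Risk", l1), ("Average", l2), ("Good", l3), ("Top Performer", l4 ++ [sid])] := by
              simp [classifyStepA, h1, h2, h3, h4, PySem.Dict.modify, PySem.Dict.getD, PySem.Dict.get?,
                    PySem.Dict.insert, PySem.Dict.contains]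
            rw [hs, ih]
            have hm : ¬(marks < 40) := by omega
            have ha : ¬(attendance < 50) := by omega
            have f2 : ¬(marks ≤ 70) := by omega
            have f3 : ¬(marks ≤ 90) := by omega
            simp [hm, ha, f2, f3, h4.1, h4.2]
          · have n2 : ¬((40 ≤ marks ∧ marks ≤ 70) ∧ 50 ≤ attendance) := by omega
            have n3 : ¬((71 ≤ marks ∧ marks ≤ 90) ∧ 50 ≤ attendance) := by omega
            have hs : classifyStepA (PySem.Dict.mk [("At Risk", l1), ("Average", l2), ("Good", l3), ("Top Performer", l4)]) (sid, marks, attendance, asg, pi)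
                = PySem.Dict.mk [("At Risk", l1), ("Average", l2), ("Good", l3), ("Top Performer", l4)] := by
              simp [classifyStepA, h1, h2, h3, h4]
            rw [hs, ih]
            have hm : ¬(marks < 40) := by omega
            have ha : ¬(attendance < 50) := by omega
            have f2 : ¬(marks ≤ 70) := by omega
            have f3 : ¬(marks ≤ 90) := by omega
            have fa : ¬(80 < attendance) := by omega
            simp [hm, ha, f2, f3, fa]

-- ===== VERDICT (by name: the statement is the Claim_ definition above) =====
theorem classify_students_spec : Claim_equal_classify_students := by
  intro data _
  show classify_students data = classify_students_alt data
  simpa [classify_students, classify_students_alt] using classify_foldl_inv data [] [] [] []
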